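-- pv_equiv track=rewrite | github.com/mohansai52/seizure-detection | code.py | count_sessions
-- ===== SOURCE A (Python) =====
-- def count_sessions(predictions):
--
--     sessions = 0
--     active = False
--
--     for p in predictions:
--
--         if p == 1 and not active:
--             sessions += 1
--             active = True
--
--         elif p == 0:
--             active = False
--
--     return sessions
-- ===== SOURCE B (Python) =====
-- def count_sessions(predictions):
--     rel = [p for p in predictions if p == 0 or p == 1]
--     ones = rel.count(1)
--     doubles = sum(1 for a, b in zip(rel, rel[1:]) if a == 1 and b == 1)
--     return ones - doubles
-- ===== Notes on version B (the rewrite author's own statement) =====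
-- stated objective: alternative
-- what changed: Replaces A's stateful edge-detecting pass with an arithmetic identity on the filtered 0/1 sequence: number of 1-runs = (count of 1s) minus (count of adjacent 1,1 pairs), computed as two independent counts.
import Mathlib
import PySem

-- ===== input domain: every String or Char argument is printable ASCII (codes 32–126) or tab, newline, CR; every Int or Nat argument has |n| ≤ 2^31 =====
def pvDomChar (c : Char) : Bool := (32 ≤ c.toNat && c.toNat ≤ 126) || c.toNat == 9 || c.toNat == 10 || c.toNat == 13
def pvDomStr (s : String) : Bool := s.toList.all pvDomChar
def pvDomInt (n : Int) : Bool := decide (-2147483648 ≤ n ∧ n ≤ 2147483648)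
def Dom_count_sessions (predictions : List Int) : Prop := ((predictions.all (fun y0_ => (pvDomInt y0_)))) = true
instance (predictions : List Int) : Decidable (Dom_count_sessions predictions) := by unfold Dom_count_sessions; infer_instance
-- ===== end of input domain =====

-- B replaces A's stateful edge-detecting pass with an arithmetic identity on the
-- filtered 0/1 sequence: #1-runs = (#1s) - (#adjacent (1,1) pairs); same cost.

-- ===== PORT A =====
-- A's loop state: (sessions, active)
def count_sessions (predictions : List Int) : Int :=
  (predictions.foldl
    (fun st p =>
      if p == 1 && !st.2 then (st.1 + 1, true)
      else if p == 0 then (st.1, false)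
      else st)
    ((0 : Int), false)).1

-- ===== PORT B =====
-- rel = filtered 0/1 values; ones = rel.count(1); doubles = # adjacent (1,1) pairs via zip(rel, rel[1:])
def count_sessions_alt (predictions : List Int) : Int :=
  let rel := predictions.filter (fun p => p == 0 || p == 1)
  let ones : Int := rel.count 1
  let doubles : Int := ((rel.zip rel.tail).filter (fun ab => ab.1 == 1 && ab.2 == 1)).length
  ones - doubles

-- ===== PRECONDITION & SPEC =====
def Spec_count_sessions (predictions : List Int) (out : Int) : Prop := out = count_sessions_alt predictions
instance (predictions : List Int) (out : Int) : Decidable (Spec_count_sessions predictions out) := by unfold Spec_count_sessions; infer_instance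

-- ===== CLAIM =====
def Claim_equal_count_sessions : Prop := ∀ (predictions : List Int), Dom_count_sessions predictions → Spec_count_sessions predictions (count_sessions predictions)

-- ===== LEMMAS AND PROOFS =====

-- A's step function
def csStep (st : Int × Bool) (p : Int) : Int × Bool :=
  if p == 1 && !st.2 then (st.1 + 1, true)
  else if p == 0 then (st.1, false)
  else st

-- boundary-aware adjacent-(1,1) count: b says "previous element was 1"
def csAdj (b : Bool) : List Int → Int
  | [] => 0
  | x :: xs => (if b && x == 1 then 1 else 0) + csAdj (x == 1) xs

-- A's fold ignores values other than 0/1, so it may be taken over the filtered list.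
theorem csFold_filter (l : List Int) (st : Int × Bool) :
    l.foldl csStep st = (l.filter (fun p => p == 0 || p == 1)).foldl csStep st := by
  induction l generalizing st with
  | nil => rfl
  | cons x xs ih =>
    by_cases hx : x = 0 ∨ x = 1
    · have : (x == 0 || x == 1) = true := by
        rcases hx with h | h <;> simp [h]
      simp [List.filter, this, List.foldl, ih]
    · rw [not_or] at hx
      have h0 : (x == (0:Int)) = false := by simp [hx.1]
      have h1 : (x == (1:Int)) = false := by simp [hx.2]
      simp [List.filter, h0, h1, List.foldl, csStep, ih]

-- On a 0/1 list, A's fold from (s, b) computes s + count1 - csAdj b.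
theorem csFold_count (l : List Int) (s : Int) (b : Bool)
    (hl : ∀ x ∈ l, x = 0 ∨ x = 1) :
    (l.foldl csStep (s, b)).1 = s + (l.count 1 : Int) - csAdj b l := by
  induction l generalizing s b with
  | nil => simp [csAdj]
  | cons x xs ih =>
    have hx := hl x (by simp)
    have hxs : ∀ y ∈ xs, y = 0 ∨ y = 1 := fun y hy => hl y (List.mem_cons_of_mem _ hy)
    rcases hx with h | h
    · subst h
      have := ih s false hxs
      simp only [List.foldl, csStep, csAdj]
      simp_all
    · subst h
      simp only [List.foldl, csStep, csAdj, List.count_cons]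
      cases b with
      | false =>
        have := ih (s + 1) true hxs
        simp_all; ring
      | true =>
        have := ih s true hxs
        simp_all; ring

-- csAdj false equals the zip-based doubles count.
theorem csAdj_eq_zip (l : List Int) (x : Int) :
    csAdj (x == 1) l = ((List.zip (x :: l) l).filter (fun ab => ab.1 == 1 && ab.2 == 1)).length := by
  induction l generalizing x with
  | nil => simp [csAdj]
  | cons y ys ih =>
    simp only [csAdj, List.zip, List.zipWith, List.filter]
    by_cases h : (x == (1:Int)) && (y == 1)
    · simp [List.zip, h, ih y]; ring
    · simp [List.zip, h, ih y]

theorem csAdj_false_eq (l : List Int) :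
    csAdj false l = ((l.zip l.tail).filter (fun ab => ab.1 == 1 && ab.2 == 1)).length := by
  cases l with
  | nil => simp [csAdj]
  | cons x xs =>
    have h := csAdj_eq_zip xs x
    simp only [csAdj, List.tail]
    cases hx : (x == (1:Int)) with
    | true => simpa [hx] using h
    | false => simpa [hx] using h

-- ===== VERDICT =====
theorem count_sessions_spec : Claim_equal_count_sessions := by
  intro predictions _
  unfold Spec_count_sessions count_sessions count_sessions_alt
  have hstep : (fun (st : Int × Bool) (p : Int) =>
      if p == 1 && !st.2 then (st.1 + 1, true)
      else if p == 0 then (st.1, false)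
      else st) = csStep := by
    funext st p; rfl
  rw [hstep, csFold_filter]
  set rel := predictions.filter (fun p => p == 0 || p == 1) with hrel
  have hl : ∀ x ∈ rel, x = 0 ∨ x = 1 := by
    intro x hx
    have := List.of_mem_filter hx
    rcases Bool.or_eq_true_iff.1 this with h | h
    · left; exact (beq_iff_eq).1 h
    · right; exact (beq_iff_eq).1 h
  have h1 := csFold_count rel 0 false hl
  rw [h1, csAdj_false_eq]
  simp
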